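-- pv_equiv track=rewrite | github.com/Oshin-09/Final-Project-Masters | ct_scan_dashboard.py | classify_vertebrae
-- ===== SOURCE A (Python) =====
-- def classify_vertebrae(slab):
--         if any(c in slab for c in ['C1', 'C2', 'C3', 'C4', 'C5', 'C6', 'C7']):
--             return 'Cervical'
--         elif any(t in slab for t in ['T1', 'T2', 'T3', 'T4', 'T5', 'T6', 'T7', 'T8', 'T9', 'T10', 'T11', 'T12']):
--             return 'Thoracic'
--         elif any(l in slab for l in ['L1', 'L2', 'L3', 'L4', 'L5']):
--             return 'Lumbar'
--         elif 'SACRUM' in slab or 'LSTV' in slab: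
--             return 'Sacral'
--         return 'Other'
-- ===== SOURCE B (Python) =====
-- def classify_vertebrae(slab):
--     # Single left-to-right scan of the slab: at each position, decode the local
--     # two-character window (letter + level digit) or a literal SACRUM/LSTV prefix,
--     # and keep the best (highest-priority) region rank seen so far.
--     best = 4
--     n = len(slab)
--     for i in range(n):
--         c = slab[i]
--         nxt = slab[i + 1] if i + 1 < n else ''
--         if c == 'C' and '1' <= nxt <= '7':
--             best = min(best, 0)
--         if c == 'T' and '1' <= nxt <= '9':
--             best = min(best, 1)
--         if c == 'L' and '1' <= nxt <= '5':
--             best = min(best, 2)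
--         if slab.startswith('SACRUM', i) or slab.startswith('LSTV', i):
--             best = min(best, 3)
--     return ('Cervical', 'Thoracic', 'Lumbar', 'Sacral', 'Other')[best]
-- ===== Notes on version B (the rewrite author's own statement) =====
-- stated objective: alternative
-- what changed: Instead of testing 26 label substrings with four any()-guards, B makes a single left-to-right scan of the slab, decoding at each position the local window (region letter followed by a level digit in range, or a SACRUM/LSTV prefix) and keeping the best priority rank seen; the rank indexes the region-name tuple at the end.
import Mathlib
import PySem

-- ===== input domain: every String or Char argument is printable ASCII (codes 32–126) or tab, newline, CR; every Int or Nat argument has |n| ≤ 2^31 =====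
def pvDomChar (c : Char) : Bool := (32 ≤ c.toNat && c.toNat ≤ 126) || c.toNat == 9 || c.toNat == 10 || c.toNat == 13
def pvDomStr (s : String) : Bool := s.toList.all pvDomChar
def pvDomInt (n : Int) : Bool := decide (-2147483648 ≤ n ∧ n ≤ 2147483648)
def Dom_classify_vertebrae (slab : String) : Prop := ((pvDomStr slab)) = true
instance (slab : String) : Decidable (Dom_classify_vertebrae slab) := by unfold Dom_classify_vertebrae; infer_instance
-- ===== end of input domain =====

-- B replaces A's four any()-over-26-labels guards by a single left-to-right scan of the slab
-- that decodes the local window (region letter + level digit, or a SACRUM/LSTV prefix) and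
-- keeps the best priority rank seen (objective: alternative).

-- ===== PORT A =====
def classify_vertebrae (slab : String) : String :=
  if (["C1", "C2", "C3", "C4", "C5", "C6", "C7"] : List String).any
      (fun c => PySem.Str.isIn c slab) then "Cervical"
  else if (["T1", "T2", "T3", "T4", "T5", "T6", "T7", "T8", "T9", "T10", "T11", "T12"] : List String).any
      (fun t => PySem.Str.isIn t slab) then "Thoracic"
  else if (["L1", "L2", "L3", "L4", "L5"] : List String).any
      (fun l => PySem.Str.isIn l slab) then "Lumbar"
  else if PySem.Str.isIn "SACRUM" slab || PySem.Str.isIn "LSTV" slab then "Sacral"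
  else "Other"

-- ===== PORT B =====
-- mirrors Source B's "'1' <= nxt <= hi" where nxt is the next one-char string, or '' at the end
def pvLevelLE (nxt : Option Char) (hi : Char) : Bool :=
  match nxt with
  | some d => decide ('1' ≤ d ∧ d ≤ hi)
  | none => false

-- Source B's loop over positions i, transcribed as structural recursion over the suffix at i;
-- slab.startswith(p, i) is p.isPrefixOf (current suffix)
def pvScan : List Char → Nat → Nat
  | [], best => best
  | c :: rest, best =>
    let b1 := if c == 'C' && pvLevelLE rest.head? '7' then min best 0 else best
    let b2 := if c == 'T' && pvLevelLE rest.head? '9' then min b1 1 else b1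
    let b3 := if c == 'L' && pvLevelLE rest.head? '5' then min b2 2 else b2
    let b4 := if "SACRUM".toList.isPrefixOf (c :: rest) || "LSTV".toList.isPrefixOf (c :: rest)
              then min b3 3 else b3
    pvScan rest b4

def pvRegionNames : List String := ["Cervical", "Thoracic", "Lumbar", "Sacral", "Other"]

def classify_vertebrae_alt (slab : String) : String :=
  pvRegionNames.getD (pvScan slab.toList 4) "Other"

-- ===== PRECONDITION & SPEC =====
def Spec_classify_vertebrae (slab : String) (out : String) : Prop := out = classify_vertebrae_alt slab
instance (slab : String) (out : String) : Decidable (Spec_classify_vertebrae slab out) := by unfold Spec_classify_vertebrae; infer_instance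

-- ===== CLAIM (what is proved, stated in full; the proofs are below) =====
def Claim_equal_classify_vertebrae : Prop := ∀ (slab : String), Dom_classify_vertebrae slab → Spec_classify_vertebrae slab (classify_vertebrae slab)

-- ===== LEMMAS AND PROOFS =====

def pvHitC (t : List Char) : Bool :=
  match t with | c :: rest => c == 'C' && pvLevelLE rest.head? '7' | [] => false
def pvHitT (t : List Char) : Bool :=
  match t with | c :: rest => c == 'T' && pvLevelLE rest.head? '9' | [] => false
def pvHitL (t : List Char) : Bool :=
  match t with | c :: rest => c == 'L' && pvLevelLE rest.head? '5' | [] => false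
def pvHitS (t : List Char) : Bool :=
  "SACRUM".toList.isPrefixOf t || "LSTV".toList.isPrefixOf t

def pvRank (t : List Char) : Nat :=
  if pvHitC t then 0 else if pvHitT t then 1 else if pvHitL t then 2 else if pvHitS t then 3 else 4

def pvMinRank : List Char → Nat
  | [] => 4
  | c :: rest => min (pvRank (c :: rest)) (pvMinRank rest)

def pvHas (hit : List Char → Bool) : List Char → Bool
  | [] => false
  | c :: rest => hit (c :: rest) || pvHas hit rest

theorem charToNatInj (a b : Char) (h : a.toNat = b.toNat) : a = b :=
  Char.ext (UInt32.toBitVec_inj.mp (BitVec.toNat_inj.mp h))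

theorem pvScan_cons (c : Char) (rest : List Char) (best : Nat) (hb : best ≤ 4) :
    pvScan (c :: rest) best = pvScan rest (min best (pvRank (c :: rest))) := by
  simp only [pvScan, pvRank, pvHitC, pvHitT, pvHitL, pvHitS]
  congr 1
  by_cases hC : (c == 'C' && pvLevelLE rest.head? '7') = true <;>
  by_cases hT : (c == 'T' && pvLevelLE rest.head? '9') = true <;>
  by_cases hL : (c == 'L' && pvLevelLE rest.head? '5') = true <;>
  by_cases hS : ("SACRUM".toList.isPrefixOf (c :: rest) || "LSTV".toList.isPrefixOf (c :: rest)) = true <;>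
    (simp only [hC, hT, hL, hS]; simp) <;> omega

theorem pvScan_eq (l : List Char) : ∀ best : Nat, best ≤ 4 → pvScan l best = min best (pvMinRank l) := by
  induction l with
  | nil => intro best h; simp only [pvScan, pvMinRank]; omega
  | cons c rest ih =>
    intro best h
    rw [pvScan_cons c rest best h, ih _ (by omega), pvMinRank]
    omega

theorem pvMinRank_eq (l : List Char) :
    pvMinRank l = if pvHas pvHitC l then 0 else if pvHas pvHitT l then 1
      else if pvHas pvHitL l then 2 else if pvHas pvHitS l then 3 else 4 := by
  induction l with
  | nil => simp [pvMinRank, pvHas]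
  | cons c rest ih =>
    simp only [pvMinRank, pvHas, ih, pvRank]
    by_cases hC : pvHitC (c :: rest) = true <;> by_cases hT : pvHitT (c :: rest) = true <;>
    by_cases hL : pvHitL (c :: rest) = true <;> by_cases hS : pvHitS (c :: rest) = true <;>
    by_cases h1 : pvHas pvHitC rest = true <;> by_cases h2 : pvHas pvHitT rest = true <;>
    by_cases h3 : pvHas pvHitL rest = true <;> by_cases h4 : pvHas pvHitS rest = true <;>
      (simp only [hC, hT, hL, hS, h1, h2, h3, h4]; simp) <;> omega

theorem pvMinRank_le (l : List Char) : pvMinRank l ≤ 4 := by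
  rw [pvMinRank_eq]; split_ifs <;> omega

theorem pvHas_iff (hit : List Char → Bool) (l : List Char) (h0 : hit [] = false) :
    pvHas hit l = true ↔ ∃ t, t <:+ l ∧ hit t = true := by
  induction l with
  | nil => simp [pvHas, List.suffix_nil, h0]
  | cons c rest ih =>
    simp only [pvHas, Bool.or_eq_true, ih]
    constructor
    · rintro (h | ⟨t, ht, hh⟩)
      · exact ⟨c :: rest, List.suffix_refl _, h⟩
      · exact ⟨t, ht.trans (List.suffix_cons c rest), hh⟩
    · rintro ⟨t, ht, hh⟩
      rcases List.suffix_cons_iff.mp ht with rfl | ht'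
      · exact Or.inl hh
      · exact Or.inr ⟨t, ht', hh⟩

theorem pvPairSuffix_of_infix {l : List Char} {c0 d : Char} (h : [c0, d] <:+: l) :
    ∃ t rest, t <:+ l ∧ t = c0 :: d :: rest := by
  obtain ⟨t, hpre, hsuf⟩ := List.infix_iff_prefix_suffix.mp h
  obtain ⟨u, rfl⟩ := hpre
  exact ⟨_, u, hsuf, rfl⟩

theorem pvInfix_of_suffix {l t : List Char} {c0 d : Char} {rest : List Char}
    (hsuf : t <:+ l) (ht : t = c0 :: d :: rest) : [c0, d] <:+: l := by
  subst ht
  exact List.infix_iff_prefix_suffix.mpr ⟨_, ⟨rest, rfl⟩, hsuf⟩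

theorem pvHitC_pair (c0 d : Char) (rest : List Char) :
    pvHitC (c0 :: d :: rest) = (c0 == 'C' && decide ('1' ≤ d ∧ d ≤ '7')) := by
  simp [pvHitC, pvLevelLE]

theorem pvHitT_pair (c0 d : Char) (rest : List Char) :
    pvHitT (c0 :: d :: rest) = (c0 == 'T' && decide ('1' ≤ d ∧ d ≤ '9')) := by
  simp [pvHitT, pvLevelLE]

theorem pvHitL_pair (c0 d : Char) (rest : List Char) :
    pvHitL (c0 :: d :: rest) = (c0 == 'L' && decide ('1' ≤ d ∧ d ≤ '5')) := by
  simp [pvHitL, pvLevelLE]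

theorem pvHasHit_of_infix {hit : List Char → Bool} {l : List Char} {c0 d hc hd : Char}
    (hpair : ∀ (c0 d : Char) (rest : List Char), hit (c0 :: d :: rest) = (c0 == hc && decide ('1' ≤ d ∧ d ≤ hd)))
    (h : [c0, d] <:+: l) (hv : (c0 == hc && decide ('1' ≤ d ∧ d ≤ hd)) = true) :
    ∃ t, t <:+ l ∧ hit t = true := by
  obtain ⟨t, rest, hsuf, rfl⟩ := pvPairSuffix_of_infix h
  exact ⟨_, hsuf, by rw [hpair]; exact hv⟩

theorem pvCharEnum9 (d : Char) (h1 : '1' ≤ d) (h2 : d ≤ '9') :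
    d = '1' ∨ d = '2' ∨ d = '3' ∨ d = '4' ∨ d = '5' ∨ d = '6' ∨ d = '7' ∨ d = '8' ∨ d = '9' := by
  have h1' : 49 ≤ d.toNat := h1
  have h2' : d.toNat ≤ 57 := h2
  have hx : d.toNat = 49 ∨ d.toNat = 50 ∨ d.toNat = 51 ∨ d.toNat = 52 ∨ d.toNat = 53 ∨
      d.toNat = 54 ∨ d.toNat = 55 ∨ d.toNat = 56 ∨ d.toNat = 57 := by omega
  rcases hx with h | h | h | h | h | h | h | h | h
  exacts [Or.inl (charToNatInj _ _ h), Or.inr (Or.inl (charToNatInj _ _ h)),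
    Or.inr (Or.inr (Or.inl (charToNatInj _ _ h))),
    Or.inr (Or.inr (Or.inr (Or.inl (charToNatInj _ _ h)))),
    Or.inr (Or.inr (Or.inr (Or.inr (Or.inl (charToNatInj _ _ h))))),
    Or.inr (Or.inr (Or.inr (Or.inr (Or.inr (Or.inl (charToNatInj _ _ h)))))),
    Or.inr (Or.inr (Or.inr (Or.inr (Or.inr (Or.inr (Or.inl (charToNatInj _ _ h))))))),
    Or.inr (Or.inr (Or.inr (Or.inr (Or.inr (Or.inr (Or.inr (Or.inl (charToNatInj _ _ h)))))))),
    Or.inr (Or.inr (Or.inr (Or.inr (Or.inr (Or.inr (Or.inr (Or.inr (charToNatInj _ _ h))))))))]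

theorem condC (slab : String) :
    ((["C1", "C2", "C3", "C4", "C5", "C6", "C7"] : List String).any
      (fun c => PySem.Str.isIn c slab)) = pvHas pvHitC slab.toList := by
  rw [Bool.eq_iff_iff, List.any_eq_true, pvHas_iff _ _ rfl]
  constructor
  · rintro ⟨s, hs, hin⟩
    rw [PySem.Str.isIn_iff_infix _ _] at hin
    simp only [List.mem_cons, List.not_mem_nil, or_false] at hs
    rcases hs with rfl | rfl | rfl | rfl | rfl | rfl | rfl
    · exact pvHasHit_of_infix pvHitC_pair (show ['C', '1'] <:+: _ from hin) (by decide)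
    · exact pvHasHit_of_infix pvHitC_pair (show ['C', '2'] <:+: _ from hin) (by decide)
    · exact pvHasHit_of_infix pvHitC_pair (show ['C', '3'] <:+: _ from hin) (by decide)
    · exact pvHasHit_of_infix pvHitC_pair (show ['C', '4'] <:+: _ from hin) (by decide)
    · exact pvHasHit_of_infix pvHitC_pair (show ['C', '5'] <:+: _ from hin) (by decide)
    · exact pvHasHit_of_infix pvHitC_pair (show ['C', '6'] <:+: _ from hin) (by decide)
    · exact pvHasHit_of_infix pvHitC_pair (show ['C', '7'] <:+: _ from hin) (by decide)
  · rintro ⟨t, hsuf, hh⟩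
    match t, hh with
    | c :: rest, hh =>
      simp only [pvHitC, Bool.and_eq_true, beq_iff_eq] at hh
      obtain ⟨rfl, hlev⟩ := hh
      match rest, hlev with
      | d :: rest', hlev =>
        simp only [List.head?_cons, pvLevelLE, decide_eq_true_eq] at hlev
        obtain ⟨hd1, hd2⟩ := hlev
        have h9 : d ≤ '9' := le_trans hd2 (by decide)
        rcases pvCharEnum9 d hd1 h9 with rfl | rfl | rfl | rfl | rfl | rfl | rfl | rfl | rfl
        · exact ⟨"C1", by simp, (PySem.Str.isIn_iff_infix _ _).mpr (pvInfix_of_suffix hsuf rfl)⟩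
        · exact ⟨"C2", by simp, (PySem.Str.isIn_iff_infix _ _).mpr (pvInfix_of_suffix hsuf rfl)⟩
        · exact ⟨"C3", by simp, (PySem.Str.isIn_iff_infix _ _).mpr (pvInfix_of_suffix hsuf rfl)⟩
        · exact ⟨"C4", by simp, (PySem.Str.isIn_iff_infix _ _).mpr (pvInfix_of_suffix hsuf rfl)⟩
        · exact ⟨"C5", by simp, (PySem.Str.isIn_iff_infix _ _).mpr (pvInfix_of_suffix hsuf rfl)⟩
        · exact ⟨"C6", by simp, (PySem.Str.isIn_iff_infix _ _).mpr (pvInfix_of_suffix hsuf rfl)⟩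
        · exact ⟨"C7", by simp, (PySem.Str.isIn_iff_infix _ _).mpr (pvInfix_of_suffix hsuf rfl)⟩
        · exact absurd hd2 (by decide)
        · exact absurd hd2 (by decide)

theorem condT (slab : String) :
    ((["T1", "T2", "T3", "T4", "T5", "T6", "T7", "T8", "T9", "T10", "T11", "T12"] : List String).any
      (fun t => PySem.Str.isIn t slab)) = pvHas pvHitT slab.toList := by
  rw [Bool.eq_iff_iff, List.any_eq_true, pvHas_iff _ _ rfl]
  constructor
  · rintro ⟨s, hs, hin⟩
    rw [PySem.Str.isIn_iff_infix _ _] at hin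
    simp only [List.mem_cons, List.not_mem_nil, or_false] at hs
    rcases hs with rfl | rfl | rfl | rfl | rfl | rfl | rfl | rfl | rfl | rfl | rfl | rfl
    · exact pvHasHit_of_infix pvHitT_pair (show ['T', '1'] <:+: _ from hin) (by decide)
    · exact pvHasHit_of_infix pvHitT_pair (show ['T', '2'] <:+: _ from hin) (by decide)
    · exact pvHasHit_of_infix pvHitT_pair (show ['T', '3'] <:+: _ from hin) (by decide)
    · exact pvHasHit_of_infix pvHitT_pair (show ['T', '4'] <:+: _ from hin) (by decide)
    · exact pvHasHit_of_infix pvHitT_pair (show ['T', '5'] <:+: _ from hin) (by decide)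
    · exact pvHasHit_of_infix pvHitT_pair (show ['T', '6'] <:+: _ from hin) (by decide)
    · exact pvHasHit_of_infix pvHitT_pair (show ['T', '7'] <:+: _ from hin) (by decide)
    · exact pvHasHit_of_infix pvHitT_pair (show ['T', '8'] <:+: _ from hin) (by decide)
    · exact pvHasHit_of_infix pvHitT_pair (show ['T', '9'] <:+: _ from hin) (by decide)
    · exact pvHasHit_of_infix pvHitT_pair
        (List.IsInfix.trans (show ['T', '1'] <:+: "T10".toList by decide) hin) (by decide)
    · exact pvHasHit_of_infix pvHitT_pair
        (List.IsInfix.trans (show ['T', '1'] <:+: "T11".toList by decide) hin) (by decide)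
    · exact pvHasHit_of_infix pvHitT_pair
        (List.IsInfix.trans (show ['T', '1'] <:+: "T12".toList by decide) hin) (by decide)
  · rintro ⟨t, hsuf, hh⟩
    match t, hh with
    | c :: rest, hh =>
      simp only [pvHitT, Bool.and_eq_true, beq_iff_eq] at hh
      obtain ⟨rfl, hlev⟩ := hh
      match rest, hlev with
      | d :: rest', hlev =>
        simp only [List.head?_cons, pvLevelLE, decide_eq_true_eq] at hlev
        obtain ⟨hd1, hd2⟩ := hlev
        rcases pvCharEnum9 d hd1 hd2 with rfl | rfl | rfl | rfl | rfl | rfl | rfl | rfl | rfl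
        · exact ⟨"T1", by simp, (PySem.Str.isIn_iff_infix _ _).mpr (pvInfix_of_suffix hsuf rfl)⟩
        · exact ⟨"T2", by simp, (PySem.Str.isIn_iff_infix _ _).mpr (pvInfix_of_suffix hsuf rfl)⟩
        · exact ⟨"T3", by simp, (PySem.Str.isIn_iff_infix _ _).mpr (pvInfix_of_suffix hsuf rfl)⟩
        · exact ⟨"T4", by simp, (PySem.Str.isIn_iff_infix _ _).mpr (pvInfix_of_suffix hsuf rfl)⟩
        · exact ⟨"T5", by simp, (PySem.Str.isIn_iff_infix _ _).mpr (pvInfix_of_suffix hsuf rfl)⟩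
        · exact ⟨"T6", by simp, (PySem.Str.isIn_iff_infix _ _).mpr (pvInfix_of_suffix hsuf rfl)⟩
        · exact ⟨"T7", by simp, (PySem.Str.isIn_iff_infix _ _).mpr (pvInfix_of_suffix hsuf rfl)⟩
        · exact ⟨"T8", by simp, (PySem.Str.isIn_iff_infix _ _).mpr (pvInfix_of_suffix hsuf rfl)⟩
        · exact ⟨"T9", by simp, (PySem.Str.isIn_iff_infix _ _).mpr (pvInfix_of_suffix hsuf rfl)⟩

theorem condL (slab : String) :
    ((["L1", "L2", "L3", "L4", "L5"] : List String).any
      (fun l => PySem.Str.isIn l slab)) = pvHas pvHitL slab.toList := by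
  rw [Bool.eq_iff_iff, List.any_eq_true, pvHas_iff _ _ rfl]
  constructor
  · rintro ⟨s, hs, hin⟩
    rw [PySem.Str.isIn_iff_infix _ _] at hin
    simp only [List.mem_cons, List.not_mem_nil, or_false] at hs
    rcases hs with rfl | rfl | rfl | rfl | rfl
    · exact pvHasHit_of_infix pvHitL_pair (show ['L', '1'] <:+: _ from hin) (by decide)
    · exact pvHasHit_of_infix pvHitL_pair (show ['L', '2'] <:+: _ from hin) (by decide)
    · exact pvHasHit_of_infix pvHitL_pair (show ['L', '3'] <:+: _ from hin) (by decide)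
    · exact pvHasHit_of_infix pvHitL_pair (show ['L', '4'] <:+: _ from hin) (by decide)
    · exact pvHasHit_of_infix pvHitL_pair (show ['L', '5'] <:+: _ from hin) (by decide)
  · rintro ⟨t, hsuf, hh⟩
    match t, hh with
    | c :: rest, hh =>
      simp only [pvHitL, Bool.and_eq_true, beq_iff_eq] at hh
      obtain ⟨rfl, hlev⟩ := hh
      match rest, hlev with
      | d :: rest', hlev =>
        simp only [List.head?_cons, pvLevelLE, decide_eq_true_eq] at hlev
        obtain ⟨hd1, hd2⟩ := hlev
        have h9 : d ≤ '9' := le_trans hd2 (by decide)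
        rcases pvCharEnum9 d hd1 h9 with rfl | rfl | rfl | rfl | rfl | rfl | rfl | rfl | rfl
        · exact ⟨"L1", by simp, (PySem.Str.isIn_iff_infix _ _).mpr (pvInfix_of_suffix hsuf rfl)⟩
        · exact ⟨"L2", by simp, (PySem.Str.isIn_iff_infix _ _).mpr (pvInfix_of_suffix hsuf rfl)⟩
        · exact ⟨"L3", by simp, (PySem.Str.isIn_iff_infix _ _).mpr (pvInfix_of_suffix hsuf rfl)⟩
        · exact ⟨"L4", by simp, (PySem.Str.isIn_iff_infix _ _).mpr (pvInfix_of_suffix hsuf rfl)⟩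
        · exact ⟨"L5", by simp, (PySem.Str.isIn_iff_infix _ _).mpr (pvInfix_of_suffix hsuf rfl)⟩
        · exact absurd hd2 (by decide)
        · exact absurd hd2 (by decide)
        · exact absurd hd2 (by decide)
        · exact absurd hd2 (by decide)

theorem condS (slab : String) :
    (PySem.Str.isIn "SACRUM" slab || PySem.Str.isIn "LSTV" slab) = pvHas pvHitS slab.toList := by
  rw [Bool.eq_iff_iff, Bool.or_eq_true, pvHas_iff _ _ rfl]
  constructor
  · rintro (h | h) <;> rw [PySem.Str.isIn_iff_infix _ _] at h <;>
      obtain ⟨t, hpre, hsuf⟩ := List.infix_iff_prefix_suffix.mp h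
    · exact ⟨t, hsuf, by simp only [pvHitS, Bool.or_eq_true, List.isPrefixOf_iff_prefix]
                         exact Or.inl hpre⟩
    · exact ⟨t, hsuf, by simp only [pvHitS, Bool.or_eq_true, List.isPrefixOf_iff_prefix]
                         exact Or.inr hpre⟩
  · rintro ⟨t, hsuf, hh⟩
    simp only [pvHitS, Bool.or_eq_true, List.isPrefixOf_iff_prefix] at hh
    rcases hh with h | h
    · exact Or.inl ((PySem.Str.isIn_iff_infix _ _).mpr (List.infix_iff_prefix_suffix.mpr ⟨t, h, hsuf⟩))
    · exact Or.inr ((PySem.Str.isIn_iff_infix _ _).mpr (List.infix_iff_prefix_suffix.mpr ⟨t, h, hsuf⟩))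

theorem classify_eq (slab : String) : classify_vertebrae slab = classify_vertebrae_alt slab := by
  unfold classify_vertebrae classify_vertebrae_alt
  rw [pvScan_eq _ 4 (le_refl 4)]
  have hm : min 4 (pvMinRank slab.toList) = pvMinRank slab.toList := by
    have := pvMinRank_le slab.toList; omega
  rw [hm, pvMinRank_eq, ← condC slab, ← condT slab, ← condL slab, ← condS slab]
  split_ifs <;> rfl

-- ===== VERDICT (by name: the statement is the Claim_ definition above) =====
theorem classify_vertebrae_spec : Claim_equal_classify_vertebrae := by
  intro slab _
  unfold Spec_classify_vertebrae
  exact classify_eq slab
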